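-- pv_equiv track=rewrite | github.com/dudamarlena/pyc_source | pycfiles/hyperopt-0.2.3-py2-none-any/base.cpython-35.py | spec_from_misc
-- ===== SOURCE A (Python) =====
-- def spec_from_misc(misc):
--     spec = {}
--     for k, v in list(misc['vals'].items()):
--         if len(v) == 0:
--             pass
--         else:
--             if len(v) == 1:
--                 spec[k] = v[0]
--             else:
--                 raise NotImplementedError('multiple values', (k, v))
--
--     return spec
-- ===== SOURCE B (Python) =====
-- def spec_from_misc(misc):
--     # Recursive decomposition: build the kept (key, value) pairs as a list,
--     # head ++ recursion on the tail, and only turn them into a dict at the end.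
--     def go(items):
--         if not items:
--             return []
--         (k, v), rest = items[0], items[1:]
--         if len(v) > 1:
--             raise NotImplementedError('multiple values', (k, v))
--         head = [(k, v[0])] if v else []
--         return head + go(rest)
--     return dict(go(list(misc['vals'].items())))
-- ===== Notes on version B (the rewrite author's own statement) =====
-- stated objective: alternative
-- what changed: A's imperative loop that mutates a dict in place is replaced by a recursive function that assembles the kept (key, value) pairs as a list built head-plus-tail (raising on a multi-valued entry as it recurses) and converts that pair list to a dict once at the end.
import Mathlib
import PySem

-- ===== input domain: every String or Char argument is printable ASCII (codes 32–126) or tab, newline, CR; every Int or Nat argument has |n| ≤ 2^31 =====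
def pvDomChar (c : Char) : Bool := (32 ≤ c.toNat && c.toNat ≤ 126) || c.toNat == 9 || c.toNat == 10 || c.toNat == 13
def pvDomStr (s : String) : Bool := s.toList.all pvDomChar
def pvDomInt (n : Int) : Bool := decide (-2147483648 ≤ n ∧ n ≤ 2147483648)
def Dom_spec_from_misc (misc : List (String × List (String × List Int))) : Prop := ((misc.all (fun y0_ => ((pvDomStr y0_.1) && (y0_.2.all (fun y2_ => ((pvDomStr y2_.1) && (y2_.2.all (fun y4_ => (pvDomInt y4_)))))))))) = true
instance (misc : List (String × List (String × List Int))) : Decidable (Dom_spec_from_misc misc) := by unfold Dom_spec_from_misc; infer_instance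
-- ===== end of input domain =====

-- B replaces A's in-place dict-mutating loop by a recursive head-plus-tail construction of the
-- kept pair list, converted to a dict once at the end (alternative decomposition, same cost).

-- ===== PORT A =====
-- misc is a Python dict: build it as a PySem.Dict, as dict construction does; likewise 'vals'.
-- A-side helper: the body of A's loop (skip empty / spec[k] = v[0] / raise, the raise excluded by Pre_)
def pvStep (spec : PySem.Dict String Int) (kv : String × List Int) : PySem.Dict String Int :=
  if kv.2.length = 0 then spec
  else if kv.2.length = 1 then
    -- spec[k] = v[0]; v[0] exists since len(v) = 1, so getD 0 is never used
    spec.insert kv.1 ((PySem.List.pyGet? kv.2 0).getD 0)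
  else spec  -- raise NotImplementedError — excluded by Pre_

def spec_from_misc (misc : List (String × List (String × List Int))) : List (String × Int) :=
  -- misc['vals']; Pre_ guarantees the key is present (KeyError otherwise), so getD [] is never used
  let vals := ((PySem.Dict.ofList misc).get? "vals").getD []
  -- for k, v in list(misc['vals'].items()): …
  let spec := (PySem.Dict.ofList vals).items.foldl pvStep PySem.Dict.empty
  spec.items

-- ===== PORT B =====
-- B-side helper: the recursive 'go' — head pair (if v nonempty) ++ recursion on the tail;
-- the raise on len(v) > 1 is excluded by Pre_
def pvGo : List (String × List Int) → List (String × Int)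
  | [] => []
  | (k, v) :: rest =>
    if v.length > 1 then pvGo rest  -- raise NotImplementedError — excluded by Pre_
    else (if v.length ≠ 0 then [(k, (PySem.List.pyGet? v 0).getD 0)] else []) ++ pvGo rest

def spec_from_misc_alt (misc : List (String × List (String × List Int))) : List (String × Int) :=
  let vals := ((PySem.Dict.ofList misc).get? "vals").getD []
  -- dict(go(list(vals.items())))
  (PySem.Dict.ofList (pvGo (PySem.Dict.ofList vals).items)).items

-- ===== PRECONDITION & SPEC =====
-- Pre_ excludes exactly the inputs on which A raises: a missing 'vals' key (KeyError) and any
-- surviving entry of the 'vals' dict with more than one value (NotImplementedError).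
def Pre_spec_from_misc (misc : List (String × List (String × List Int))) : Prop :=
  ((PySem.Dict.ofList misc).get? "vals").isSome = true ∧
  ∀ p ∈ (PySem.Dict.ofList (((PySem.Dict.ofList misc).get? "vals").getD [])).items, p.2.length ≤ 1
instance (misc : List (String × List (String × List Int))) : Decidable (Pre_spec_from_misc misc) := by unfold Pre_spec_from_misc; infer_instance

def pvWitness_spec_from_misc : (List (String × List (String × List Int))) :=
  [("vals", [("x", [1]), ("y", []), ("z", [5])])]

def Spec_spec_from_misc (misc : List (String × List (String × List Int))) (out : List (String × Int)) : Prop := out = spec_from_misc_alt misc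
instance (misc : List (String × List (String × List Int))) (out : List (String × Int)) : Decidable (Spec_spec_from_misc misc out) := by unfold Spec_spec_from_misc; infer_instance

-- ===== CLAIM (what is proved, stated in full; the proofs are below) =====
def Claim_equal_spec_from_misc : Prop := ∀ (misc : List (String × List (String × List Int))), Dom_spec_from_misc misc → Pre_spec_from_misc misc → Spec_spec_from_misc misc (spec_from_misc misc)

-- ===== LEMMAS AND PROOFS =====

-- proof-side characterisation shared by both sides: keep k ↦ v[0] exactly when len(v) = 1
def pvKeep (kv : String × List Int) : Option (String × Int) :=
  if kv.2.length = 1 then some (kv.1, (PySem.List.pyGet? kv.2 0).getD 0) else none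

-- A's loop, started from a dict whose keys are disjoint from the remaining items' keys,
-- appends exactly the filterMap of the remaining items.
theorem pv_loop_eq (l : List (String × List Int)) (spec : PySem.Dict String Int)
    (hpre : ∀ p ∈ l, p.2.length ≤ 1)
    (hnd : (l.map (·.1)).Nodup)
    (hdisj : ∀ k ∈ l.map (·.1), k ∉ spec.keys) :
    (l.foldl pvStep spec).items = spec.items ++ l.filterMap pvKeep := by
  induction l generalizing spec with
  | nil => simp
  | cons kv t ih =>
    obtain ⟨k, v⟩ := kv
    have hnd' : k ∉ t.map (·.1) ∧ (t.map (·.1)).Nodup :=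
      List.nodup_cons.mp (by simpa using hnd)
    have hnotmem : k ∉ spec.keys := hdisj k (by simp)
    have hnc : spec.contains k = false := by
      cases h : spec.contains k
      · rfl
      · exact absurd ((PySem.Dict.contains_iff_mem_keys spec k).mp h) hnotmem
    have hlen : v.length ≤ 1 := hpre (k, v) (by simp)
    have hpret : ∀ p ∈ t, p.2.length ≤ 1 := fun p hp => hpre p (by simp [hp])
    have hdisjt : ∀ y ∈ t.map (·.1), y ∉ spec.keys :=
      fun y hy => hdisj y (by simp at hy ⊢; right; exact hy)
    match v, hlen with
    | [], _ =>
      rw [List.foldl_cons, List.filterMap_cons_none (by simp [pvKeep]),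
        show pvStep spec (k, ([] : List Int)) = spec by simp [pvStep]]
      exact ih spec hpret hnd'.2 hdisjt
    | [x], _ =>
      rw [List.foldl_cons,
        List.filterMap_cons_some (f := pvKeep)
          (b := (k, (PySem.List.pyGet? [x] 0).getD 0)) (by simp [pvKeep]),
        show pvStep spec (k, [x]) = spec.insert k ((PySem.List.pyGet? [x] 0).getD 0) by
          simp [pvStep]]
      rw [ih _ hpret hnd'.2 ?disj]
      · rw [PySem.Dict.items_insert_of_not_contains spec _ hnc]
        simp
      case disj =>
        intro y hy
        rw [PySem.Dict.keys_insert_of_not_contains spec _ hnc]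
        simp only [List.mem_append, List.mem_singleton]
        rintro (h | rfl)
        · exact hdisjt y hy h
        · exact hnd'.1 hy

-- B's recursion equals the same filterMap when no entry is multi-valued.
theorem pv_go_eq (l : List (String × List Int)) (hpre : ∀ p ∈ l, p.2.length ≤ 1) :
    pvGo l = l.filterMap pvKeep := by
  induction l with
  | nil => rfl
  | cons kv t ih =>
    obtain ⟨k, v⟩ := kv
    have hlen : v.length ≤ 1 := hpre (k, v) (by simp)
    have hpret : ∀ p ∈ t, p.2.length ≤ 1 := fun p hp => hpre p (by simp [hp])
    match v, hlen with
    | [], _ => simp [pvGo, pvKeep, ih hpret]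
    | [x], _ => simp [pvGo, pvKeep, ih hpret]

-- the kept pairs' keys form a sublist of the original keys
theorem pv_keys_sublist (l : List (String × List Int)) :
    ((l.filterMap pvKeep).map (·.1)).Sublist (l.map (·.1)) := by
  induction l with
  | nil => simp
  | cons kv t ih =>
    obtain ⟨k, v⟩ := kv
    by_cases h : v.length = 1
    · rw [List.filterMap_cons_some (f := pvKeep)
        (b := (k, (PySem.List.pyGet? v 0).getD 0)) (by simp [pvKeep, h])]
      simpa using List.Sublist.cons₂ k ih
    · rw [List.filterMap_cons_none (by simp [pvKeep, h])]
      exact (List.map_cons .. ▸ ih.cons k)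

-- folding plain inserts of pairs with fresh, pairwise-distinct keys appends them verbatim
theorem pv_insert_fold (l : List (String × Int)) (d : PySem.Dict String Int)
    (hnd : (l.map (·.1)).Nodup)
    (hdisj : ∀ k ∈ l.map (·.1), k ∉ d.keys) :
    (l.foldl (fun d p => d.insert p.1 p.2) d).items = d.items ++ l := by
  induction l generalizing d with
  | nil => simp
  | cons p t ih =>
    have hnd' : p.1 ∉ t.map (·.1) ∧ (t.map (·.1)).Nodup :=
      List.nodup_cons.mp (by simpa using hnd)
    have hnc : d.contains p.1 = false := by
      cases h : d.contains p.1
      · rfl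
      · exact absurd ((PySem.Dict.contains_iff_mem_keys d p.1).mp h) (hdisj p.1 (by simp))
    rw [List.foldl_cons, ih _ hnd'.2 ?disj]
    · rw [PySem.Dict.items_insert_of_not_contains d _ hnc]
      simp
    case disj =>
      intro y hy
      rw [PySem.Dict.keys_insert_of_not_contains d _ hnc]
      simp only [List.mem_append, List.mem_singleton]
      rintro (h | rfl)
      · exact hdisj y (by simp at hy ⊢; right; exact hy) h
      · exact hnd'.1 hy

-- dict(pairs) with pairwise-distinct keys is exactly the pair list
theorem pv_ofList_items (l : List (String × Int)) (hnd : (l.map (·.1)).Nodup) :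
    (PySem.Dict.ofList l).items = l := by
  have h := pv_insert_fold l PySem.Dict.empty hnd (by simp [PySem.Dict.keys_empty])
  simpa using h

-- ===== VERDICT (by name: the statement is the Claim_ definition above) =====
theorem spec_from_misc_spec : Claim_equal_spec_from_misc := by
  intro misc _ hpre
  obtain ⟨hsome, hvals⟩ := hpre
  unfold Spec_spec_from_misc spec_from_misc spec_from_misc_alt
  set l := (PySem.Dict.ofList (((PySem.Dict.ofList misc).get? "vals").getD [])).items with hl
  have hnd : (l.map (·.1)).Nodup :=
    PySem.Dict.nodup_keys_ofList (ps := ((PySem.Dict.ofList misc).get? "vals").getD [])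
  have hA := pv_loop_eq l PySem.Dict.empty hvals hnd (by simp [PySem.Dict.keys_empty])
  have hB : pvGo l = l.filterMap pvKeep := pv_go_eq l hvals
  show (List.foldl pvStep PySem.Dict.empty l).items = (PySem.Dict.ofList (pvGo l)).items
  rw [hB, pv_ofList_items _ ((pv_keys_sublist l).nodup hnd)]
  simpa using hA
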